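-- pv_equiv track=rewrite | github.com/GreenBitAI/bitorch-engine | bitorch_engine/utils/quant_operators.py | get_binary_col
-- ===== SOURCE A (Python) =====
-- def bit_set(var, pos, val):
--     """
--     Sets a specific bit in an integer variable to a given value.
--
--     This method allows you to modify a single bit within an integer by shifting the `val` (either 0 or 1) to the position `pos` and then performing a bitwise OR operation with the original variable `var`. This effectively sets the bit at position `pos` to the value specified by `val`.
--
--     The operation performed is equivalent to:
--     `var |= (val << pos)`
--
--     Parameters:
--         var (int): The original integer variable whose bit is to be modified.
--         pos (int): The position of the bit to be set, starting from 0 for the least significant bit (LSB).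
--         val (int): The new value for the bit, either 0 or 1.
--
--     Returns:
--         int: The modified integer with the bit at position `pos` set to `val`.
--
--     Example:
--         >>> bit_set(0b0010, 1, 1)
--         6  # The binary representation is 0b0110
--     """
--     var |= val << pos
--     return var
--
-- def get_binary_col(nd_col, binary_col, dim_n, dim_k, bits_per_binary_word):
--     """
--     Binarizes an array column-wise, transforming each element into a binary representation.
--
--     This function is a Python re-implementation of an equivalent C++ version. It operates on
--     a columnar slice of an array, encoding each segment of BITS_PER_BINARY_WORD bits into
--     a binary word, where each bit is determined by the sign (positive or non-negative vs. negative)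
--     of the corresponding element in the input array.
--
--     The binarization process proceeds by iterating over the array in blocks of BITS_PER_BINARY_WORD,
--     setting each bit based on the sign of the corresponding element. The result is stored in a
--     pre-allocated array for binary representations.
--
--     Args:
--         nd_col (array-like): The input array containing numerical values to be binarized.
--         binary_col (array-like): Pre-allocated array where the binary representations are stored.
--         dim_n (int): The size of the dimension over which to iterate, typically the number of rows in the array.
--         dim_k (int): The size of the second dimension, typically the number of columns.
--         bits_per_binary_word (int): The number of bits in each binary word, determining the block size for binarization.
--
--     Returns:
--         array-like: The modified binary_col array containing the binary representations of the input array, column-wise.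
--
--     Example of equivalent C++ logic:
--
--     .. code-block::
--
--         for(int y=0; y<(n/BITS_PER_BINARY_WORD); y++){
--             for(int x=0; x < k; ++x){
--                 BINARY_WORD rvalue=0;
--                 BINARY_WORD sign;
--                 for(int b=0; b<BITS_PER_BINARY_WORD; ++b){
--                     sign = (col[(y*BITS_PER_BINARY_WORD+b)*k + x]>=0);
--                     BIT_SET(rvalue, b, sign);
--                 }
--                 b_col[y*k + x] = rvalue;
--             }
--         }
--     """
--     y = 0
--     while y < int(dim_n / bits_per_binary_word):
--         x = 0
--         while x < dim_k:
--             rvalue = 0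
--             b = 0
--             while b < bits_per_binary_word:
--                 sign = 0
--                 if nd_col[(y * bits_per_binary_word + b) * dim_k + x] >= 0:
--                     sign = 1
--                 rvalue = bit_set(rvalue, b, sign)
--                 b += 1
--             binary_col[y * dim_k + x] = rvalue
--             x += 1
--         y += 1
--
--     return binary_col
-- ===== SOURCE B (Python) =====
-- def get_binary_col(nd_col, binary_col, dim_n, dim_k, bits_per_binary_word):
--     # Two staged passes instead of per-word gathering: a single input-order scan
--     # SCATTERS each element's sign weight (1 << bit) into a fresh accumulator
--     # table of words, then a copy pass writes the table into binary_col.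
--     # Like A, mutates binary_col in place and returns it.
--     w = bits_per_binary_word
--     q = int(dim_n / w)
--     if q <= 0 or dim_k <= 0:
--         return binary_col
--     n = q * dim_k
--     words = [0] * n
--     if w > 0:
--         for i in range(n * w):
--             if nd_col[i] >= 0:
--                 row, x = divmod(i, dim_k)
--                 words[(row // w) * dim_k + x] += 1 << (row % w)
--     for j in range(n):
--         binary_col[j] = words[j]
--     return binary_col
-- ===== Notes on version B (the rewrite author's own statement) =====
-- stated objective: alternative
-- what changed: Replaces A's per-word gather (three nested while loops with an inner bit_set loop per output word) by two staged passes: a single input-order scan that scatters each element's sign weight (1 << bit) into a fresh accumulator table of words, then a copy pass that writes the table into binary_col.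
import Mathlib
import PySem

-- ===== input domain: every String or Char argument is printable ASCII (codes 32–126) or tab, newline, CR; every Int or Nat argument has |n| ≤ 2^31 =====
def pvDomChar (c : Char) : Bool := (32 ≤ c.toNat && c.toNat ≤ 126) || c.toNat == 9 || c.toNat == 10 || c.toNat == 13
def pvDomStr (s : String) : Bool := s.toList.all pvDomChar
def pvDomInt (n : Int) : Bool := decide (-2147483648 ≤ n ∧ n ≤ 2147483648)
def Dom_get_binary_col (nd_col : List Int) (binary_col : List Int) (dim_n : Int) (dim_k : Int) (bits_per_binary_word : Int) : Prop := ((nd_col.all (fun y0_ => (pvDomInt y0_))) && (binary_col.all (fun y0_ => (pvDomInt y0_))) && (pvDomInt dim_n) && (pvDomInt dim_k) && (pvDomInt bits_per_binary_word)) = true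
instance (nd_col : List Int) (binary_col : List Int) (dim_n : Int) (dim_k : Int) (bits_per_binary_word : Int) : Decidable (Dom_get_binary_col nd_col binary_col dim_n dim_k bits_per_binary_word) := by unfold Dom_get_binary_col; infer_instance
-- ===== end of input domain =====

-- B replaces A's per-word gather (three nested while loops, an inner bit_set loop
-- per output word) by two staged passes: one input-order scan that SCATTERS each
-- element's sign weight (1 << bit) into a fresh accumulator table of words, then a
-- copy pass that writes the table into binary_col (objective: alternative).
-- Both A and B mutate binary_col in place and return it; the theorems below are
-- about the RETURN value.

-- ===== PORT A =====
-- Python: var |= val << pos.  pos ≥ 0 at the only call site (Python raises for pos < 0,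
-- where `pos.toNat` is not exact).
def bit_set (var : Int) (pos : Int) (val : Int) : Int :=
  PySem.Int.bor var (val <<< pos.toNat)

-- while b < bits_per_binary_word: … rvalue = bit_set(rvalue, b, sign); b += 1
-- (nd_col[...] read ported with pyGetD 0; in range under Pre_)
def pyA_bitLoop (nd_col : List Int) (dim_k w y x : Int) (b rvalue : Int) : Int :=
  if _h : b < w then
    let sign : Int :=
      if PySem.List.pyGetD nd_col ((y * w + b) * dim_k + x) 0 ≥ 0 then 1 else 0
    pyA_bitLoop nd_col dim_k w y x (b + 1) (bit_set rvalue b sign)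
  else rvalue
termination_by (w - b).toNat
decreasing_by omega

-- while x < dim_k: … binary_col[y*dim_k+x] = rvalue; x += 1
def pyA_xLoop (nd_col : List Int) (dim_k w y : Int) (x : Int) (binary_col : List Int) : List Int :=
  if _h : x < dim_k then
    pyA_xLoop nd_col dim_k w y (x + 1)
      (PySem.List.pySetD binary_col (y * dim_k + x) (pyA_bitLoop nd_col dim_k w y x 0 0))
  else binary_col
termination_by (dim_k - x).toNat
decreasing_by omega

-- while y < int(dim_n / bits_per_binary_word): …; y += 1
def pyA_yLoop (nd_col : List Int) (dim_k w q : Int) (y : Int) (binary_col : List Int) : List Int :=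
  if _h : y < q then
    pyA_yLoop nd_col dim_k w q (y + 1) (pyA_xLoop nd_col dim_k w y 0 binary_col)
  else binary_col
termination_by (q - y).toNat
decreasing_by omega

def get_binary_col (nd_col : List Int) (binary_col : List Int) (dim_n : Int) (dim_k : Int) (bits_per_binary_word : Int) : List Int :=
  -- int(dim_n / bits_per_binary_word): exact via truncdiv on |·| ≤ 2^31 ⊂ 2^53
  pyA_yLoop nd_col dim_k bits_per_binary_word
    (PySem.Int.truncdiv dim_n bits_per_binary_word) 0 binary_col

-- ===== PORT B =====
-- loop body of B's scatter pass:
--   if nd_col[i] >= 0: row, x = divmod(i, dim_k); words[(row//w)*dim_k + x] += 1 << (row % w)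
def pyB_step (nd_col : List Int) (dim_k w : Int) (ws : List Int) (i : Int) : List Int :=
  if PySem.List.pyGetD nd_col i 0 ≥ 0 then
    let row := PySem.Int.floordiv i dim_k
    let x := PySem.Int.mod i dim_k
    let idx := PySem.Int.floordiv row w * dim_k + x
    PySem.List.pySetD ws idx
      (PySem.List.pyGetD ws idx 0 + (1 : Int) <<< (PySem.Int.mod row w).toNat)
  else ws

def get_binary_col_alt (nd_col : List Int) (binary_col : List Int) (dim_n : Int) (dim_k : Int) (bits_per_binary_word : Int) : List Int :=
  let w := bits_per_binary_word
  let q := PySem.Int.truncdiv dim_n w   -- int(dim_n / w), exact on the domain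
  if q ≤ 0 ∨ dim_k ≤ 0 then binary_col
  else
    let n := q * dim_k
    let words0 : List Int := List.replicate n.toNat 0      -- words = [0] * n
    let words :=
      if 0 < w then (PySem.List.pyRange 0 (n * w) 1).foldl (pyB_step nd_col dim_k w) words0
      else words0
    -- for j in range(n): binary_col[j] = words[j]
    (PySem.List.pyRange 0 n 1).foldl
      (fun bc j => PySem.List.pySetD bc j (PySem.List.pyGetD words j 0)) binary_col

-- ===== PRECONDITION & SPEC =====
-- Pre_ excludes exactly the inputs where Python A raises: bits_per_binary_word = 0
-- (ZeroDivisionError) and the inputs whose read/write indices fall outside nd_col /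
-- binary_col (IndexError).  A returns on everything Pre_ admits.
def Pre_get_binary_col (nd_col : List Int) (binary_col : List Int) (dim_n : Int) (dim_k : Int) (bits_per_binary_word : Int) : Prop :=
  bits_per_binary_word ≠ 0 ∧
  ((0 < PySem.Int.truncdiv dim_n bits_per_binary_word ∧ 0 < dim_k) →
    ((0 < bits_per_binary_word →
        PySem.Int.truncdiv dim_n bits_per_binary_word * bits_per_binary_word * dim_k ≤ (nd_col.length : Int)) ∧
      PySem.Int.truncdiv dim_n bits_per_binary_word * dim_k ≤ (binary_col.length : Int)))
instance (nd_col : List Int) (binary_col : List Int) (dim_n : Int) (dim_k : Int) (bits_per_binary_word : Int) : Decidable (Pre_get_binary_col nd_col binary_col dim_n dim_k bits_per_binary_word) := by unfold Pre_get_binary_col; infer_instance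

def pvWitness_get_binary_col : List Int × List Int × Int × Int × Int :=
  ([1, -1, 2, -2], [0, 0], 4, 1, 2)

def Spec_get_binary_col (nd_col : List Int) (binary_col : List Int) (dim_n : Int) (dim_k : Int) (bits_per_binary_word : Int) (out : List Int) : Prop := out = get_binary_col_alt nd_col binary_col dim_n dim_k bits_per_binary_word
instance (nd_col : List Int) (binary_col : List Int) (dim_n : Int) (dim_k : Int) (bits_per_binary_word : Int) (out : List Int) : Decidable (Spec_get_binary_col nd_col binary_col dim_n dim_k bits_per_binary_word out) := by unfold Spec_get_binary_col; infer_instance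

-- ===== CLAIM (what is proved, stated in full; the proofs are below) =====
def Claim_equal_get_binary_col : Prop := ∀ (nd_col : List Int) (binary_col : List Int) (dim_n : Int) (dim_k : Int) (bits_per_binary_word : Int), Dom_get_binary_col nd_col binary_col dim_n dim_k bits_per_binary_word → Pre_get_binary_col nd_col binary_col dim_n dim_k bits_per_binary_word → Spec_get_binary_col nd_col binary_col dim_n dim_k bits_per_binary_word (get_binary_col nd_col binary_col dim_n dim_k bits_per_binary_word)

-- ===== LEMMAS AND PROOFS =====

-- the word A gathers for cell (y, x): sum over bit positions b of 1 << b when the sign bit is set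
def gword (nd_col : List Int) (dim_k w y x : Int) : Int :=
  (PySem.List.pyRange 0 w 1).foldl
    (fun acc b =>
      if PySem.List.pyGetD nd_col ((y * w + b) * dim_k + x) 0 ≥ 0 then acc + ((1 : Int) <<< b.toNat)
      else acc) 0

-- the word of output cell j (decomposed as (j // dim_k, j % dim_k))
def wordAt (nd_col : List Int) (dim_k w j : Int) : Int :=
  gword nd_col dim_k w (PySem.Int.floordiv j dim_k) (PySem.Int.mod j dim_k)

-- contribution of bit b to cell (y, x) after the scatter pass has consumed inputs [0, m)
def pvTerm (nd_col : List Int) (dim_k w m y x b : Int) : Int :=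
  if (y * w + b) * dim_k + x < m ∧ PySem.List.pyGetD nd_col ((y * w + b) * dim_k + x) 0 ≥ 0 then
    (1 : Int) <<< b.toNat
  else 0

-- value of cell (y, x) after the scatter pass has consumed inputs [0, m)
def pvGsum (nd_col : List Int) (dim_k w m y x : Int) : Int :=
  ((PySem.List.pyRange 0 w 1).map (pvTerm nd_col dim_k w m y x)).sum

theorem pv_nat_lor_pow (n : Nat) : ∀ a, a < 2^n → a ||| 2^n = a + 2^n := by
  induction n with
  | zero => intro a ha; interval_cases a; decide
  | succ n ih =>
    intro a ha
    have hdiv : (a ||| 2^(n+1)) / 2 = a/2 + 2^n := by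
      have h := Nat.or_div_two (a := a) (b := 2^(n+1))
      have h2 : (2:Nat)^(n+1)/2 = 2^n := by rw [pow_succ]; omega
      rw [h2] at h
      rw [h, ih (a/2) (by rw [pow_succ] at ha; omega)]
    have hmod : (a ||| 2^(n+1)) % 2 = a % 2 := by
      have h0 : (a ||| 2^(n+1)).testBit 0 = (a.testBit 0 || (2^(n+1)).testBit 0) := Nat.testBit_or a _ 0
      have h1 : (2^(n+1)).testBit 0 = false := by simp
      simp only [Nat.testBit_zero, h1, Bool.or_false] at h0
      rcases Nat.mod_two_eq_zero_or_one a with h | h <;> rcases Nat.mod_two_eq_zero_or_one (a ||| 2^(n+1)) with h' | h' <;> simp [h, h'] at h0 ⊢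
    have e1 := Nat.div_add_mod (a ||| 2^(n+1)) 2
    have e2 : (2:Nat)^(n+1) = 2*2^n := by rw [pow_succ]; omega
    omega

theorem pv_lor_pow (r : Int) (n : Nat) (h0 : 0 ≤ r) (h : r < 2 ^ n) :
    PySem.Int.bor r ((1 : Int) <<< n) = r + (1 : Int) <<< n := by
  have hs : (1:Int) <<< n = 2^n := by simp [Int.shiftLeft_eq]
  rw [hs, PySem.Int.bor_of_nonneg h0 (by positivity)]
  have ht : ((2:Int)^n).toNat = 2^n := rfl
  have hr : r.toNat < 2^n := by omega
  rw [ht, pv_nat_lor_pow n r.toNat hr]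
  push_cast
  omega

theorem pv_bitLoop_eq_fold (nd_col : List Int) (dim_k w y x : Int) :
    ∀ (b r : Int), 0 ≤ b → 0 ≤ r → r < 2 ^ b.toNat →
    pyA_bitLoop nd_col dim_k w y x b r =
      (PySem.List.pyRange b w 1).foldl
        (fun acc bb =>
          if PySem.List.pyGetD nd_col ((y * w + bb) * dim_k + x) 0 ≥ 0 then
            acc + ((1 : Int) <<< bb.toNat)
          else acc) r := by
  suffices h : ∀ (n : Nat) (b r : Int), (w - b).toNat = n → 0 ≤ b → 0 ≤ r → r < 2 ^ b.toNat →
      pyA_bitLoop nd_col dim_k w y x b r =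
        (PySem.List.pyRange b w 1).foldl
          (fun acc bb =>
            if PySem.List.pyGetD nd_col ((y * w + bb) * dim_k + x) 0 ≥ 0 then
              acc + ((1 : Int) <<< bb.toNat)
            else acc) r by
    intro b r hb hr hlt; exact h (w - b).toNat b r rfl hb hr hlt
  intro n
  induction n with
  | zero =>
    intro b r hn hb hr hlt
    have hbw : ¬ b < w := by omega
    rw [pyA_bitLoop, dif_neg hbw, PySem.List.pyRange_one_eq_nil (by omega), List.foldl_nil]
  | succ n ih =>
    intro b r hn hb hr hlt
    have hbw : b < w := by omega
    rw [pyA_bitLoop, dif_pos hbw, PySem.List.pyRange_one_cons hbw, List.foldl_cons]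
    have hshift : ((1:Int) <<< b.toNat) = 2 ^ b.toNat := by simp [Int.shiftLeft_eq]
    have hp : (0:Int) < 2 ^ b.toNat := by positivity
    have h1 : (b + 1).toNat = b.toNat + 1 := by omega
    by_cases hc : PySem.List.pyGetD nd_col ((y * w + b) * dim_k + x) 0 ≥ 0
    all_goals simp only [hc, if_true, if_false]
    · have hbs : bit_set r b 1 = r + (1:Int) <<< b.toNat := pv_lor_pow r b.toNat hr hlt
      rw [hbs]
      refine ih (b + 1) (r + (1:Int) <<< b.toNat) (by omega) (by omega)
        (by rw [hshift]; omega) (by rw [hshift, h1, pow_succ]; omega)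
    · have hbs : bit_set r b 0 = r := by
        simp [bit_set, PySem.Int.bor_zero]
      rw [hbs]
      exact ih (b + 1) r (by omega) (by omega) hr (by rw [h1, pow_succ]; omega)

theorem pv_word_eq (nd_col : List Int) (dim_k w y x : Int) (_hy : 0 ≤ y) (hx : 0 ≤ x)
    (hxk : x < dim_k) :
    pyA_bitLoop nd_col dim_k w y x 0 0 = wordAt nd_col dim_k w (y * dim_k + x) := by
  have hk : 0 < dim_k := lt_of_le_of_lt hx hxk
  have hcomm : y * dim_k + x = x + dim_k * y := by ring
  have hfd : PySem.Int.floordiv (y * dim_k + x) dim_k = y := by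
    rw [PySem.Int.floordiv_eq_ediv_of_pos hk, hcomm, Int.add_mul_ediv_left _ _ (ne_of_gt hk),
      Int.ediv_eq_zero_of_lt hx hxk, zero_add]
  have hmd : PySem.Int.mod (y * dim_k + x) dim_k = x := by
    rw [PySem.Int.mod_eq_emod_of_pos hk, hcomm, Int.add_mul_emod_self_left,
      Int.emod_eq_of_lt hx hxk]
  simp only [wordAt, gword, hfd, hmd]
  exact pv_bitLoop_eq_fold nd_col dim_k w y x 0 0 le_rfl le_rfl (by simp)

theorem pv_xLoop_eq_fold (nd_col : List Int) (dim_k w y : Int) (hy : 0 ≤ y) (_hk : 0 < dim_k) :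
    ∀ (x : Int) (bc : List Int), 0 ≤ x →
    pyA_xLoop nd_col dim_k w y x bc =
      (PySem.List.pyRange (y * dim_k + x) (y * dim_k + dim_k) 1).foldl
        (fun bc j => PySem.List.pySetD bc j (wordAt nd_col dim_k w j)) bc := by
  suffices h : ∀ (n : Nat) (x : Int) (bc : List Int), (dim_k - x).toNat = n → 0 ≤ x →
      pyA_xLoop nd_col dim_k w y x bc =
        (PySem.List.pyRange (y * dim_k + x) (y * dim_k + dim_k) 1).foldl
          (fun bc j => PySem.List.pySetD bc j (wordAt nd_col dim_k w j)) bc by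
    intro x bc hx; exact h (dim_k - x).toNat x bc rfl hx
  intro n
  induction n with
  | zero =>
    intro x bc hn hx
    have hxk : ¬ x < dim_k := by omega
    rw [pyA_xLoop, dif_neg hxk, PySem.List.pyRange_one_eq_nil (by omega), List.foldl_nil]
  | succ n ih =>
    intro x bc hn hx
    have hxk : x < dim_k := by omega
    rw [pyA_xLoop, dif_pos hxk,
      PySem.List.pyRange_one_cons (by omega : y * dim_k + x < y * dim_k + dim_k),
      List.foldl_cons, pv_word_eq nd_col dim_k w y x hy hx hxk,
      show y * dim_k + x + 1 = y * dim_k + (x + 1) by ring]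
    exact ih (x + 1) _ (by omega) (by omega)

theorem pv_yLoop_eq_fold (nd_col : List Int) (dim_k w q : Int) (hk : 0 < dim_k) :
    ∀ (y : Int) (bc : List Int), 0 ≤ y →
    pyA_yLoop nd_col dim_k w q y bc =
      (PySem.List.pyRange (y * dim_k) (q * dim_k) 1).foldl
        (fun bc j => PySem.List.pySetD bc j (wordAt nd_col dim_k w j)) bc := by
  suffices h : ∀ (n : Nat) (y : Int) (bc : List Int), (q - y).toNat = n → 0 ≤ y →
      pyA_yLoop nd_col dim_k w q y bc =
        (PySem.List.pyRange (y * dim_k) (q * dim_k) 1).foldl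
          (fun bc j => PySem.List.pySetD bc j (wordAt nd_col dim_k w j)) bc by
    intro y bc hy; exact h (q - y).toNat y bc rfl hy
  intro n
  induction n with
  | zero =>
    intro y bc hn hy
    have hyq : ¬ y < q := by omega
    have hle : q * dim_k ≤ y * dim_k := by
      apply mul_le_mul_of_nonneg_right (by omega) (le_of_lt hk)
    rw [pyA_yLoop, dif_neg hyq, PySem.List.pyRange_one_eq_nil hle, List.foldl_nil]
  | succ n ih =>
    intro y bc hn hy
    have hyq : y < q := by omega
    have h1 : y * dim_k ≤ y * dim_k + dim_k := by omega
    have h2 : y * dim_k + dim_k ≤ q * dim_k := by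
      have : (y + 1) * dim_k ≤ q * dim_k :=
        mul_le_mul_of_nonneg_right (by omega) (le_of_lt hk)
      linarith [this]
    rw [pyA_yLoop, dif_pos hyq,
      pv_xLoop_eq_fold nd_col dim_k w y hy hk 0 bc le_rfl,
      ih (y + 1) _ (by omega) (by omega),
      PySem.List.pyRange_one_append (y * dim_k) (y * dim_k + dim_k) (q * dim_k) h1 h2,
      List.foldl_append,
      show (y + 1) * dim_k = y * dim_k + dim_k by ring,
      show y * dim_k + 0 = y * dim_k by ring]

theorem pv_yLoop_id (nd_col : List Int) (dim_k w q : Int) (hk : ¬ 0 < dim_k) :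
    ∀ (y : Int) (bc : List Int), pyA_yLoop nd_col dim_k w q y bc = bc := by
  suffices h : ∀ (n : Nat) (y : Int) (bc : List Int), (q - y).toNat = n →
      pyA_yLoop nd_col dim_k w q y bc = bc by
    intro y bc; exact h (q - y).toNat y bc rfl
  intro n
  induction n with
  | zero =>
    intro y bc hn
    rw [pyA_yLoop]
    split
    · next hyq => omega
    · rfl
  | succ n ih =>
    intro y bc hn
    rw [pyA_yLoop]
    split
    · next hyq =>
      rw [pyA_xLoop, dif_neg hk]
      exact ih (y + 1) bc (by omega)
    · rfl

-- B-side lemmas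

theorem pv_getD_replicate (n : Nat) (j : Int) (hj : 0 ≤ j) :
    PySem.List.pyGetD (List.replicate n (0 : Int)) j 0 = 0 := by
  rw [PySem.List.pyGetD_of_nonneg _ _ hj]
  simp [List.getD]

theorem pv_getD_setD (ws : List Int) (a j v : Int) (ha0 : 0 ≤ a)
    (hj0 : 0 ≤ j) (hjL : j < (ws.length : Int)) :
    PySem.List.pyGetD (PySem.List.pySetD ws a v) j 0 =
      if j = a then v else PySem.List.pyGetD ws j 0 := by
  rw [PySem.List.pySetD_of_nonneg ws v ha0,
    PySem.List.pyGetD_eq_getElem _ _ hj0 (by simp only [List.length_set]; omega),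
    List.getElem_set]
  by_cases h : j = a
  · rw [if_pos (by omega), if_pos h]
  · rw [if_neg (by omega), if_neg h, PySem.List.pyGetD_eq_getElem _ _ hj0 hjL]

theorem pv_cell_eq (dim_k y x y' x' : Int) (hk : 0 < dim_k) (hx0 : 0 ≤ x) (hxk : x < dim_k)
    (hx0' : 0 ≤ x') (hxk' : x' < dim_k) (h : y * dim_k + x = y' * dim_k + x') :
    y = y' ∧ x = x' := by
  have hy : y = y' := by
    by_contra hne
    rcases lt_or_gt_of_ne hne with hlt | hlt
    · have : (y + 1) * dim_k ≤ y' * dim_k := mul_le_mul_of_nonneg_right (by omega) (le_of_lt hk)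
      nlinarith
    · have : (y' + 1) * dim_k ≤ y * dim_k := mul_le_mul_of_nonneg_right (by omega) (le_of_lt hk)
      nlinarith
  refine ⟨hy, ?_⟩
  subst hy; omega

theorem pv_wordAt_decomp (nd_col : List Int) (dim_k w y x : Int) (hx : 0 ≤ x) (hxk : x < dim_k) :
    wordAt nd_col dim_k w (y * dim_k + x) = gword nd_col dim_k w y x := by
  have hk : 0 < dim_k := lt_of_le_of_lt hx hxk
  have hcomm : y * dim_k + x = x + dim_k * y := by ring
  have hfd : PySem.Int.floordiv (y * dim_k + x) dim_k = y := by
    rw [PySem.Int.floordiv_eq_ediv_of_pos hk, hcomm, Int.add_mul_ediv_left _ _ (ne_of_gt hk),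
      Int.ediv_eq_zero_of_lt hx hxk, zero_add]
  have hmd : PySem.Int.mod (y * dim_k + x) dim_k = x := by
    rw [PySem.Int.mod_eq_emod_of_pos hk, hcomm, Int.add_mul_emod_self_left,
      Int.emod_eq_of_lt hx hxk]
  rw [wordAt, hfd, hmd]

theorem pv_step_len (nd_col : List Int) (dim_k w : Int) (ws : List Int) (i : Int) :
    (pyB_step nd_col dim_k w ws i).length = ws.length := by
  unfold pyB_step
  split
  · exact PySem.List.length_pySetD ..
  · rfl

theorem pv_scatter_len (nd_col : List Int) (dim_k w : Int) (ws : List Int) :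
    ∀ m : Int, 0 ≤ m →
    ((PySem.List.pyRange 0 m 1).foldl (pyB_step nd_col dim_k w) ws).length = ws.length := by
  intro m hm
  induction m, hm using Int.le_induction with
  | base => rw [PySem.List.pyRange_one_eq_nil le_rfl, List.foldl_nil]
  | succ m hm ih =>
    rw [PySem.List.pyRange_one_succ_right hm, List.foldl_append, List.foldl_cons,
      List.foldl_nil, pv_step_len, ih]

theorem pv_term_succ_ne (nd_col : List Int) (dim_k w m y x b : Int)
    (hne : (y * w + b) * dim_k + x ≠ m) :
    pvTerm nd_col dim_k w (m + 1) y x b = pvTerm nd_col dim_k w m y x b := by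
  have h : ((y * w + b) * dim_k + x < m + 1) ↔ ((y * w + b) * dim_k + x < m) := by omega
  simp only [pvTerm, h]

theorem pv_term_succ_sign (nd_col : List Int) (dim_k w m y x b : Int)
    (he : (y * w + b) * dim_k + x = m) (hns : ¬ PySem.List.pyGetD nd_col m 0 ≥ 0) :
    pvTerm nd_col dim_k w (m + 1) y x b = pvTerm nd_col dim_k w m y x b := by
  simp only [pvTerm, he]
  rw [if_neg (by tauto), if_neg (by tauto)]

theorem pv_gsum_succ_ne (nd_col : List Int) (dim_k w m y x : Int)
    (h : ∀ b : Int, 0 ≤ b → b < w → (y * w + b) * dim_k + x ≠ m) :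
    pvGsum nd_col dim_k w (m + 1) y x = pvGsum nd_col dim_k w m y x := by
  unfold pvGsum
  congr 1
  apply List.map_congr_left
  intro b hb
  rw [PySem.List.mem_pyRange_one] at hb
  exact pv_term_succ_ne nd_col dim_k w m y x b (h b hb.1 hb.2)

theorem pv_gsum_succ_sign (nd_col : List Int) (dim_k w m y x : Int)
    (hns : ¬ PySem.List.pyGetD nd_col m 0 ≥ 0) :
    pvGsum nd_col dim_k w (m + 1) y x = pvGsum nd_col dim_k w m y x := by
  unfold pvGsum
  congr 1
  apply List.map_congr_left
  intro b _
  by_cases he : (y * w + b) * dim_k + x = m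
  · exact pv_term_succ_sign nd_col dim_k w m y x b he hns
  · exact pv_term_succ_ne nd_col dim_k w m y x b he

theorem pv_gsum_succ_hit (nd_col : List Int) (dim_k w m y x bm : Int)
    (hbm0 : 0 ≤ bm) (hbmw : bm < w) (hidx : (y * w + bm) * dim_k + x = m)
    (hs : PySem.List.pyGetD nd_col m 0 ≥ 0)
    (hinj : ∀ b : Int, 0 ≤ b → b < w → (y * w + b) * dim_k + x = m → b = bm) :
    pvGsum nd_col dim_k w (m + 1) y x = pvGsum nd_col dim_k w m y x + (1 : Int) <<< bm.toNat := by
  unfold pvGsum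
  rw [PySem.List.pyRange_one_append 0 bm w hbm0 (le_of_lt hbmw),
    PySem.List.pyRange_one_cons hbmw]
  simp only [List.map_append, List.map_cons, List.sum_append, List.sum_cons]
  have hside : ∀ b : Int, b ∈ PySem.List.pyRange 0 bm 1 ∨ b ∈ PySem.List.pyRange (bm + 1) w 1 →
      pvTerm nd_col dim_k w (m + 1) y x b = pvTerm nd_col dim_k w m y x b := by
    intro b hb
    apply pv_term_succ_ne
    intro he
    have hb' : 0 ≤ b ∧ b < w ∧ b ≠ bm := by
      rcases hb with hb | hb <;> rw [PySem.List.mem_pyRange_one] at hb <;>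
        exact ⟨by omega, by omega, by omega⟩
    exact hb'.2.2 (hinj b hb'.1 hb'.2.1 he)
  rw [List.map_congr_left (fun b hb => hside b (Or.inl hb)),
    List.map_congr_left (fun b hb => hside b (Or.inr hb))]
  have h1 : pvTerm nd_col dim_k w (m + 1) y x bm = (1 : Int) <<< bm.toNat := by
    simp only [pvTerm, hidx]
    rw [if_pos ⟨by omega, hs⟩]
  have h2 : pvTerm nd_col dim_k w m y x bm = 0 := by
    simp only [pvTerm, hidx]
    rw [if_neg (by omega)]
  rw [h1, h2]
  ring

theorem pv_scatter_inv (nd_col : List Int) (dim_k w q : Int) (hk : 0 < dim_k) (hw : 0 < w)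
    (hq : 0 < q) :
    ∀ m : Int, 0 ≤ m → m ≤ q * dim_k * w → ∀ y x : Int, 0 ≤ y → y < q → 0 ≤ x → x < dim_k →
    PySem.List.pyGetD ((PySem.List.pyRange 0 m 1).foldl (pyB_step nd_col dim_k w)
        (List.replicate (q * dim_k).toNat 0)) (y * dim_k + x) 0 = pvGsum nd_col dim_k w m y x := by
  intro m hm
  induction m, hm using Int.le_induction with
  | base =>
    intro _ y x hy0 hyq hx0 hxk
    rw [PySem.List.pyRange_one_eq_nil le_rfl, List.foldl_nil,
      pv_getD_replicate _ _ (by positivity)]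
    symm
    apply List.sum_eq_zero
    intro t ht
    rcases List.mem_map.mp ht with ⟨b, hb, rfl⟩
    rw [PySem.List.mem_pyRange_one] at hb
    have hnn : ¬ ((y * w + b) * dim_k + x < 0) := by
      have h1 : 0 ≤ y * w + b := by
        have := mul_nonneg hy0 (le_of_lt hw); omega
      have h2 : 0 ≤ (y * w + b) * dim_k := mul_nonneg h1 (le_of_lt hk)
      omega
    simp only [pvTerm]
    rw [if_neg (by tauto)]
  | succ m hm ih =>
    intro hm1 y x hy0 hyq hx0 hxk
    have hmB : m ≤ q * dim_k * w := by omega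
    rw [PySem.List.pyRange_one_succ_right hm, List.foldl_append, List.foldl_cons, List.foldl_nil]
    set s := (PySem.List.pyRange 0 m 1).foldl (pyB_step nd_col dim_k w)
      (List.replicate (q * dim_k).toNat 0) with hs_def
    have hlen : (s.length : Int) = q * dim_k := by
      rw [pv_scatter_len nd_col dim_k w _ m hm, List.length_replicate]
      have : 0 < q * dim_k := mul_pos hq hk
      omega
    set row := PySem.Int.floordiv m dim_k with hrow_def
    set xm := PySem.Int.mod m dim_k with hxm_def
    set ym := PySem.Int.floordiv row w with hym_def
    set bm := PySem.Int.mod row w with hbm_def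
    have hxm0 : 0 ≤ xm := PySem.Int.mod_nonneg _ hk
    have hxmk : xm < dim_k := PySem.Int.mod_lt _ hk
    have hbm0 : 0 ≤ bm := PySem.Int.mod_nonneg _ hw
    have hbmw : bm < w := PySem.Int.mod_lt _ hw
    have hm_eq : row * dim_k + xm = m := PySem.Int.floordiv_mul_add_mod m dim_k
    have hrow_eq : ym * w + bm = row := PySem.Int.floordiv_mul_add_mod row w
    have hrow0 : 0 ≤ row := by
      rw [hrow_def, PySem.Int.floordiv_eq_ediv_of_pos hk]
      exact Int.ediv_nonneg hm (le_of_lt hk)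
    have hprod : q * dim_k * w = q * w * dim_k := by ring
    have hrowlt : row < q * w := by
      rw [hrow_def, PySem.Int.floordiv_lt_iff_lt_mul hk]
      omega
    have hym0 : 0 ≤ ym := by
      rw [hym_def, PySem.Int.floordiv_eq_ediv_of_pos hw]
      exact Int.ediv_nonneg hrow0 (le_of_lt hw)
    have hymq : ym < q := by
      rw [hym_def, PySem.Int.floordiv_lt_iff_lt_mul hw]
      omega
    have hidx_bm : (ym * w + bm) * dim_k + xm = m := by rw [hrow_eq, hm_eq]
    have hidxm0 : 0 ≤ ym * dim_k + xm := by
      have := mul_nonneg hym0 (le_of_lt hk); omega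
    have hidxm_lt : ym * dim_k + xm < q * dim_k := by
      have h1 : (ym + 1) * dim_k ≤ q * dim_k := mul_le_mul_of_nonneg_right (by omega) (le_of_lt hk)
      nlinarith
    have hj0 : 0 ≤ y * dim_k + x := by
      have := mul_nonneg hy0 (le_of_lt hk); omega
    have hjlt : y * dim_k + x < q * dim_k := by
      have h1 : (y + 1) * dim_k ≤ q * dim_k := mul_le_mul_of_nonneg_right (by omega) (le_of_lt hk)
      nlinarith
    by_cases hsgn : PySem.List.pyGetD nd_col m 0 ≥ 0
    · have hstep : pyB_step nd_col dim_k w s m =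
          PySem.List.pySetD s (ym * dim_k + xm)
            (PySem.List.pyGetD s (ym * dim_k + xm) 0 + (1 : Int) <<< bm.toNat) := by
        simp only [pyB_step, if_pos hsgn, ← hrow_def, ← hxm_def, ← hym_def, ← hbm_def]
      rw [hstep, pv_getD_setD s _ _ _ hidxm0 hj0 (by omega)]
      by_cases hcell : y * dim_k + x = ym * dim_k + xm
      · obtain ⟨hyy, hxx⟩ := pv_cell_eq dim_k y x ym xm hk hx0 hxk hxm0 hxmk hcell
        have hinj : ∀ b : Int, 0 ≤ b → b < w → (ym * w + b) * dim_k + xm = m → b = bm := by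
          intro b hb0 hbw he
          have h1 := pv_cell_eq dim_k (ym * w + b) xm (ym * w + bm) xm hk hxm0 hxmk hxm0 hxmk
            (by rw [he, hidx_bm])
          omega
        rw [if_pos hcell, hyy, hxx, ih hmB ym xm hym0 hymq hxm0 hxmk,
          pv_gsum_succ_hit nd_col dim_k w m ym xm bm hbm0 hbmw hidx_bm hsgn hinj]
      · rw [if_neg hcell, ih hmB y x hy0 hyq hx0 hxk]
        symm
        apply pv_gsum_succ_ne
        intro b hb0 hbw he
        have h1 := pv_cell_eq dim_k (y * w + b) x (ym * w + bm) xm hk hx0 hxk hxm0 hxmk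
          (by rw [he, hidx_bm])
        obtain ⟨h2, h3⟩ := h1
        have h4 := pv_cell_eq w y b ym bm hw hb0 hbw hbm0 hbmw h2
        exact hcell (by rw [h4.1, h3])
    · have hstep : pyB_step nd_col dim_k w s m = s := by
        simp only [pyB_step, if_neg hsgn]
      rw [hstep, ih hmB y x hy0 hyq hx0 hxk,
        pv_gsum_succ_sign nd_col dim_k w m y x hsgn]

theorem pv_gsum_final (nd_col : List Int) (dim_k w q y x : Int) (hk : 0 < dim_k) (hw : 0 < w)
    (hyq : y < q) (hxk : x < dim_k) :
    pvGsum nd_col dim_k w (q * dim_k * w) y x = gword nd_col dim_k w y x := by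
  unfold pvGsum gword
  have h1 := PySem.List.foldl_congr_mem (l := PySem.List.pyRange 0 w 1) (init := (0 : Int))
    (f := fun acc b =>
      if PySem.List.pyGetD nd_col ((y * w + b) * dim_k + x) 0 ≥ 0
      then acc + ((1 : Int) <<< b.toNat) else acc)
    (g := fun acc b =>
      acc + (if PySem.List.pyGetD nd_col ((y * w + b) * dim_k + x) 0 ≥ 0
             then (1 : Int) <<< b.toNat else 0))
    (by intro acc b _; beta_reduce; split <;> simp)
  rw [h1, PySem.List.foldl_add, zero_add]
  congr 1
  apply List.map_congr_left
  intro b hb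
  rw [PySem.List.mem_pyRange_one] at hb
  have hlt : (y * w + b) * dim_k + x < q * dim_k * w := by
    have h1 : y * w + b ≤ q * w - 1 := by
      have := mul_le_mul_of_nonneg_right (show y + 1 ≤ q by omega) (le_of_lt hw)
      nlinarith
    have h2 : (y * w + b) * dim_k ≤ (q * w - 1) * dim_k :=
      mul_le_mul_of_nonneg_right h1 (le_of_lt hk)
    nlinarith
  simp only [pvTerm]
  by_cases hs : PySem.List.pyGetD nd_col ((y * w + b) * dim_k + x) 0 ≥ 0
  · rw [if_pos ⟨hlt, hs⟩, if_pos hs]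
  · rw [if_neg (by tauto), if_neg hs]

theorem pv_scatter_get (nd_col : List Int) (dim_k w q y x : Int) (hk : 0 < dim_k) (hw : 0 < w)
    (hq : 0 < q) (hy0 : 0 ≤ y) (hyq : y < q) (hx0 : 0 ≤ x) (hxk : x < dim_k) :
    PySem.List.pyGetD ((PySem.List.pyRange 0 (q * dim_k * w) 1).foldl (pyB_step nd_col dim_k w)
        (List.replicate (q * dim_k).toNat 0)) (y * dim_k + x) 0 = gword nd_col dim_k w y x := by
  rw [pv_scatter_inv nd_col dim_k w q hk hw hq (q * dim_k * w)
      (by positivity) le_rfl y x hy0 hyq hx0 hxk,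
    pv_gsum_final nd_col dim_k w q y x hk hw hyq hxk]

-- ===== VERDICT (by name: the statement is the Claim_ definition above) =====
theorem get_binary_col_spec : Claim_equal_get_binary_col := by
  intro nd_col bc dim_n dim_k w _hD hP
  obtain ⟨hw0, _⟩ := hP
  unfold Spec_get_binary_col get_binary_col
  simp only [get_binary_col_alt]
  by_cases hk : 0 < dim_k
  · by_cases hq : 0 < PySem.Int.truncdiv dim_n w
    · rw [pv_yLoop_eq_fold nd_col dim_k w _ hk 0 bc le_rfl, zero_mul,
        if_neg (by omega : ¬ (PySem.Int.truncdiv dim_n w ≤ 0 ∨ dim_k ≤ 0))]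
      by_cases hw : 0 < w
      · rw [if_pos hw]
        apply PySem.List.foldl_congr_mem
        intro bc' j hj
        rw [PySem.List.mem_pyRange_one] at hj
        have hx0 : 0 ≤ PySem.Int.mod j dim_k := PySem.Int.mod_nonneg _ hk
        have hxk : PySem.Int.mod j dim_k < dim_k := PySem.Int.mod_lt _ hk
        have hy0 : 0 ≤ PySem.Int.floordiv j dim_k := by
          rw [PySem.Int.floordiv_eq_ediv_of_pos hk]
          exact Int.ediv_nonneg hj.1 (le_of_lt hk)
        have hyq : PySem.Int.floordiv j dim_k < PySem.Int.truncdiv dim_n w := by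
          rw [PySem.Int.floordiv_lt_iff_lt_mul hk]
          exact hj.2
        have hdec : PySem.Int.floordiv j dim_k * dim_k + PySem.Int.mod j dim_k = j :=
          PySem.Int.floordiv_mul_add_mod j dim_k
        congr 1
        rw [← hdec, pv_wordAt_decomp nd_col dim_k w _ _ hx0 hxk,
          pv_scatter_get nd_col dim_k w (PySem.Int.truncdiv dim_n w) _ _ hk hw hq hy0 hyq hx0 hxk]
      · rw [if_neg hw]
        apply PySem.List.foldl_congr_mem
        intro bc' j hj
        rw [PySem.List.mem_pyRange_one] at hj
        have hx0 : 0 ≤ PySem.Int.mod j dim_k := PySem.Int.mod_nonneg _ hk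
        have hxk : PySem.Int.mod j dim_k < dim_k := PySem.Int.mod_lt _ hk
        have hdec : PySem.Int.floordiv j dim_k * dim_k + PySem.Int.mod j dim_k = j :=
          PySem.Int.floordiv_mul_add_mod j dim_k
        congr 1
        rw [← hdec, pv_wordAt_decomp nd_col dim_k w _ _ hx0 hxk, pv_getD_replicate _ _ (by omega),
          gword, PySem.List.pyRange_one_eq_nil (by omega), List.foldl_nil]
    · rw [pv_yLoop_eq_fold nd_col dim_k w _ hk 0 bc le_rfl, zero_mul,
        if_pos (Or.inl (by omega)),
        PySem.List.pyRange_one_eq_nil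
          (by calc PySem.Int.truncdiv dim_n w * dim_k
                ≤ 0 * dim_k := mul_le_mul_of_nonneg_right (by omega) (le_of_lt hk)
              _ = 0 := by ring),
        List.foldl_nil]
  · rw [pv_yLoop_id nd_col dim_k w _ hk 0 bc, if_pos (Or.inr (by omega))]
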